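-- pv_equiv track=rewrite | github.com/trueafricandevtests/techs_dev_test | app/views.py | count_per_recipe
-- ===== SOURCE A (Python) =====
-- def count_per_recipe(recipes):
--     count_per_recipe=[]
--     seen_recipes=[]
--     for recipe in recipes:
--         if recipe not in seen_recipes:
--             seen_recipes.append(recipe)
--             count_per_recipe.append({"recipe": recipe, "count": recipes.count(recipe)})
--
--     def realsort(e):
--         return e['recipe']
--
--     count_per_recipe.sort(key=realsort)
--     return count_per_recipe
-- ===== SOURCE B (Python) =====
-- def count_per_recipe(recipes):
--     out = []
--     for r in sorted(recipes):
--         if out and out[-1]["recipe"] == r: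
--             out[-1]["count"] += 1
--         else:
--             out.append({"recipe": r, "count": 1})
--     return out
-- ===== Notes on version B (the rewrite author's own statement) =====
-- stated objective: faster
-- what changed: B sorts a copy of the input once and counts consecutive equal runs in a single pass, instead of A's membership-list scan with a full recipes.count() re-scan per distinct value plus a final sort.
import Mathlib
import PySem

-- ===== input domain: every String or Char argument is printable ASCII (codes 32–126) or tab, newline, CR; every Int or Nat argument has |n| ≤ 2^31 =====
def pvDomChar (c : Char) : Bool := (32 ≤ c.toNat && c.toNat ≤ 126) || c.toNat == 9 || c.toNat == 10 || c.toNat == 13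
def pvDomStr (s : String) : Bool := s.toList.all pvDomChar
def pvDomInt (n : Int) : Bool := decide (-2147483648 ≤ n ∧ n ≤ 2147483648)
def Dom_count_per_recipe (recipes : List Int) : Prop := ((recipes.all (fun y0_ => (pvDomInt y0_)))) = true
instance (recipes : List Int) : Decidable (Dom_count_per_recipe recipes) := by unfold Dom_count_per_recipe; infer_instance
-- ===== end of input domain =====

-- B sorts a copy of the input once and counts consecutive equal runs in one pass, instead of
-- A's membership-list scan with a recipes.count() re-scan per distinct value plus a final sort.

-- ===== PORT A =====
-- realsort e = e['recipe']; every dict A builds carries the key "recipe", so the KeyError case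
-- (none, defaulted to 0 here) is unreachable.
def realsort (e : List (String × Int)) : Int :=
  ((PySem.Dict.mk e).get? "recipe").getD 0

def count_per_recipe (recipes : List Int) : List (List (String × Int)) :=
  let acc := recipes.foldl
    (fun (acc : List (List (String × Int)) × List Int) recipe =>
      if acc.2.contains recipe then acc
      else (acc.1 ++ [[("recipe", recipe), ("count", (PySem.List.count recipes recipe : Int))]],
            acc.2 ++ [recipe]))
    ([], [])
  PySem.List.sorted acc.1 realsort false

-- ===== PORT B =====
-- out[-1]["count"] += 1 : update the "count" entry of the last dict in place
def pvBump (d : List (String × Int)) : List (String × Int) :=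
  d.map (fun p => if p.1 == "count" then (p.1, p.2 + 1) else p)

-- one iteration of B's loop body
def pvStepB (out : List (List (String × Int))) (r : Int) : List (List (String × Int)) :=
  match out.getLast? with
  | some d =>
      if ((PySem.Dict.mk d).get? "recipe").getD 0 = r then out.dropLast ++ [pvBump d]
      else out ++ [[("recipe", r), ("count", 1)]]
  | none => out ++ [[("recipe", r), ("count", 1)]]

def count_per_recipe_alt (recipes : List Int) : List (List (String × Int)) :=
  (PySem.List.sorted recipes (fun x => x) false).foldl pvStepB []

-- ===== PRECONDITION & SPEC =====
def Spec_count_per_recipe (recipes : List Int) (out : List (List (String × Int))) : Prop := out = count_per_recipe_alt recipes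
instance (recipes : List Int) (out : List (List (String × Int))) : Decidable (Spec_count_per_recipe recipes out) := by unfold Spec_count_per_recipe; infer_instance

-- ===== CLAIM (what is proved, stated in full; the proofs are below) =====
def Claim_equal_count_per_recipe : Prop := ∀ (recipes : List Int), Dom_count_per_recipe recipes → Spec_count_per_recipe recipes (count_per_recipe recipes)

-- ===== LEMMAS AND PROOFS =====

-- the dict {"recipe": r, "count": c}
def fD (r c : Int) : List (String × Int) := [("recipe", r), ("count", c)]

-- the dict A builds for value r
def fC (recipes : List Int) (r : Int) : List (String × Int) := fD r (recipes.count r : Int)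

lemma get_fD (r c : Int) : ((PySem.Dict.mk (fD r c)).get? "recipe").getD 0 = r := by
  simp [fD, PySem.Dict.get?]

lemma realsort_fD (r c : Int) : realsort (fD r c) = r := get_fD r c

lemma pvBump_fD (r c : Int) : pvBump (fD r c) = fD r (c + 1) := by
  simp [pvBump, fD]

lemma cntI_self (r : Int) (xs : List Int) :
    (((r :: xs).count r : Nat) : Int) = (xs.count r : Int) + 1 := by
  rw [List.count_cons_self]; push_cast; ring

lemma cntI_ne {r y : Int} (h : r ≠ y) (xs : List Int) :
    (((r :: xs).count y : Nat) : Int) = (xs.count y : Int) := by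
  rw [List.count_cons_of_ne h]

-- the run-grouping that B's loop produces, starting from a current run (r, c)
def pvRuns (r c : Int) : List Int → List (List (String × Int))
  | [] => [fD r c]
  | x :: xs => if r = x then pvRuns r (c + 1) xs else fD r c :: pvRuns x 1 xs

lemma foldl_stepB_runs (s : List Int) : ∀ (out0 : List (List (String × Int))) (r c : Int),
    s.foldl pvStepB (out0 ++ [fD r c]) = out0 ++ pvRuns r c s := by
  induction s with
  | nil => intro out0 r c; simp [pvRuns]
  | cons x xs ih =>
    intro out0 r c
    simp only [List.foldl_cons, pvRuns]
    by_cases h : r = x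
    · have hstep : pvStepB (out0 ++ [fD r c]) x = out0 ++ [fD r (c + 1)] := by
        simp only [pvStepB, List.getLast?_concat]
        rw [get_fD, if_pos h, List.dropLast_concat, pvBump_fD]
      rw [hstep, ih, if_pos h]
    · have hstep : pvStepB (out0 ++ [fD r c]) x = (out0 ++ [fD r c]) ++ [fD x 1] := by
        simp only [pvStepB, List.getLast?_concat]
        rw [get_fD, if_neg h]
        rfl
      rw [hstep, ih, if_neg h, List.append_assoc]
      rfl

-- keys of pvRuns: strictly increasing and bounded below by r (on a sorted, r-lower-bounded tail)
lemma pvRuns_keys (s : List Int) : ∀ (r c : Int), (∀ z ∈ s, r ≤ z) → s.Pairwise (· ≤ ·) →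
    ((pvRuns r c s).map realsort).Pairwise (· < ·) ∧ ∀ k ∈ (pvRuns r c s).map realsort, r ≤ k := by
  induction s with
  | nil => intro r c _ _; simp [pvRuns, realsort_fD]
  | cons x xs ih =>
    intro r c hlb hpw
    have hxlb : ∀ z ∈ xs, x ≤ z := fun z hz => (List.pairwise_cons.1 hpw).1 z hz
    have hxs : xs.Pairwise (· ≤ ·) := (List.pairwise_cons.1 hpw).2
    simp only [pvRuns]
    by_cases h : r = x
    · subst h
      rw [if_pos rfl]
      exact ih r (c + 1) hxlb hxs
    · have hrx : r < x := lt_of_le_of_ne (hlb x (List.mem_cons_self)) h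
      obtain ⟨ih1, ih2⟩ := ih x 1 hxlb hxs
      rw [if_neg h]
      constructor
      · simp only [List.map_cons, List.pairwise_cons, realsort_fD]
        exact ⟨fun k hk => lt_of_lt_of_le hrx (ih2 k hk), ih1⟩
      · intro k hk
        simp only [List.map_cons, List.mem_cons, realsort_fD] at hk
        rcases hk with hk | hk
        · exact le_of_eq hk.symm
        · exact le_trans (le_of_lt hrx) (ih2 k hk)

-- membership in pvRuns, with counts taken from the tail list
lemma pvRuns_mem (s : List Int) : ∀ (r c : Int), (∀ z ∈ s, r ≤ z) → s.Pairwise (· ≤ ·) →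
    ∀ d, d ∈ pvRuns r c s ↔
      d = fD r (c + (s.count r : Int)) ∨ ∃ y ∈ s, y ≠ r ∧ d = fD y ((s.count y : Int)) := by
  induction s with
  | nil => intro r c _ _ d; simp [pvRuns]
  | cons x xs ih =>
    intro r c hlb hpw d
    have hxlb : ∀ z ∈ xs, x ≤ z := fun z hz => (List.pairwise_cons.1 hpw).1 z hz
    have hxs : xs.Pairwise (· ≤ ·) := (List.pairwise_cons.1 hpw).2
    simp only [pvRuns]
    by_cases h : r = x
    · subst h
      rw [if_pos rfl, ih r (c + 1) hxlb hxs d, cntI_self]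
      constructor
      · rintro (hd | ⟨y, hy, hyr, hd⟩)
        · left; rw [hd]; congr 1; ring
        · right
          exact ⟨y, List.mem_cons_of_mem _ hy, hyr,
            by rw [hd, cntI_ne (Ne.symm hyr)]⟩
      · rintro (hd | ⟨y, hy, hyr, hd⟩)
        · left; rw [hd]; congr 1; ring
        · rcases List.mem_cons.1 hy with rfl | hy
          · exact absurd rfl hyr
          · right; exact ⟨y, hy, hyr, by rw [hd, cntI_ne (Ne.symm hyr)]⟩
    · have hrx : r < x := lt_of_le_of_ne (hlb x (List.mem_cons_self)) h
      have hrxs : ∀ z ∈ x :: xs, z ≠ r := by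
        intro z hz
        rcases List.mem_cons.1 hz with rfl | hz
        · exact (ne_of_lt hrx).symm
        · exact (ne_of_lt (lt_of_lt_of_le hrx (hxlb z hz))).symm
      have hcnt : ((x :: xs).count r : Int) = 0 := by
        rw [List.count_eq_zero.2 (fun hmem => hrxs r hmem rfl)]
        rfl
      rw [if_neg h]
      simp only [List.mem_cons, ih x 1 hxlb hxs d]
      constructor
      · rintro (hd | hd | ⟨y, hy, hyx, hd⟩)
        · left; rw [hd, hcnt]; ring_nf
        · right
          exact ⟨x, Or.inl rfl, (ne_of_lt hrx).symm,
            by rw [hd, cntI_self]; congr 1; ring⟩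
        · right
          exact ⟨y, Or.inr hy, hrxs y (List.mem_cons_of_mem _ hy),
            by rw [hd, cntI_ne (Ne.symm hyx)]⟩
      · rintro (hd | ⟨y, hy, hyr, hd⟩)
        · left; rw [hd, hcnt]; ring_nf
        · rcases hy with rfl | hy
          · right; left
            rw [hd, cntI_self]; congr 1; ring
          · by_cases hyx : y = x
            · subst hyx
              right; left
              rw [hd, cntI_self]; congr 1; ring
            · right; right
              exact ⟨y, hy, hyx, by rw [hd, cntI_ne (Ne.symm hyx)]⟩

-- the ordered first-occurrence dedup A's seen_recipes loop computes
def pvSeenF (seen : List Int) (l : List Int) : List Int :=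
  l.foldl (fun s r => if s.contains r then s else s ++ [r]) seen

lemma pvSeenF_nodup (l : List Int) : ∀ seen : List Int, seen.Nodup → (pvSeenF seen l).Nodup := by
  induction l with
  | nil => intro seen h; exact h
  | cons r l ih =>
    intro seen h
    simp only [pvSeenF, List.foldl_cons]
    by_cases hc : seen.contains r
    · rw [if_pos hc]; exact ih seen h
    · rw [if_neg hc]
      refine ih _ ?_
      rw [List.nodup_append]
      refine ⟨h, List.nodup_singleton r, ?_⟩
      simp only [List.contains_iff_mem] at hc
      intro a ha b hb
      rcases List.mem_singleton.1 hb with rfl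
      exact fun hab => hc (hab ▸ ha)

lemma pvSeenF_mem (l : List Int) : ∀ (seen : List Int) (x : Int),
    x ∈ pvSeenF seen l ↔ x ∈ seen ∨ x ∈ l := by
  induction l with
  | nil => intro seen x; simp [pvSeenF]
  | cons r l ih =>
    intro seen x
    simp only [pvSeenF, List.foldl_cons]
    by_cases hc : seen.contains r
    · rw [if_pos hc]
      rw [show (l.foldl (fun s r => if s.contains r then s else s ++ [r]) seen) = pvSeenF seen l from rfl, ih]
      simp only [List.contains_iff_mem] at hc
      constructor
      · rintro (h | h); exacts [Or.inl h, Or.inr (List.mem_cons_of_mem _ h)]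
      · rintro (h | h)
        · exact Or.inl h
        · rcases List.mem_cons.1 h with rfl | h
          exacts [Or.inl hc, Or.inr h]
    · rw [if_neg hc]
      rw [show (l.foldl (fun s r => if s.contains r then s else s ++ [r]) (seen ++ [r])) = pvSeenF (seen ++ [r]) l from rfl, ih]
      simp only [List.mem_append, List.mem_cons]
      tauto

-- A's main loop: the pair it builds is (map of fC over the dedup, the dedup)
lemma foldA_eq (recipes : List Int) (l : List Int) : ∀ seen : List Int,
    l.foldl
      (fun (acc : List (List (String × Int)) × List Int) recipe =>
        if acc.2.contains recipe then acc
        else (acc.1 ++ [[("recipe", recipe), ("count", (PySem.List.count recipes recipe : Int))]],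
              acc.2 ++ [recipe]))
      (seen.map (fC recipes), seen)
    = ((pvSeenF seen l).map (fC recipes), pvSeenF seen l) := by
  induction l with
  | nil => intro seen; rfl
  | cons r l ih =>
    intro seen
    simp only [List.foldl_cons, pvSeenF, List.foldl_cons]
    by_cases hc : seen.contains r
    · rw [if_pos hc, if_pos hc]; exact ih seen
    · rw [if_neg hc, if_neg hc]
      have : seen.map (fC recipes) ++ [[("recipe", r), ("count", (PySem.List.count recipes r : Int))]]
          = (seen ++ [r]).map (fC recipes) := by
        simp [fC, fD, PySem.List.count_eq]
      rw [this]
      exact ih (seen ++ [r])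

-- ===== VERDICT (by name: the statement is the Claim_ definition above) =====
theorem count_per_recipe_spec : Claim_equal_count_per_recipe := by
  intro recipes _
  unfold Spec_count_per_recipe
  rcases hs : PySem.List.sorted recipes (fun x => x) false with _ | ⟨x, xs⟩
  · -- empty input: sorted recipes = [] forces recipes = []
    have hnil : recipes = [] := (PySem.List.sorted_eq_nil_iff recipes (fun x => x) false).1 hs
    subst hnil
    rfl
  · have hperm : (x :: xs).Perm recipes := hs ▸ PySem.List.sorted_perm recipes (fun x => x) false
    have hpw : (x :: xs).Pairwise (· ≤ ·) := hs ▸ PySem.List.sorted_pairwise recipes (fun x => x)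
    have hxlb : ∀ z ∈ xs, x ≤ z := fun z hz => (List.pairwise_cons.1 hpw).1 z hz
    have hxs : xs.Pairwise (· ≤ ·) := (List.pairwise_cons.1 hpw).2
    have hcount : ∀ y : Int, (x :: xs).count y = recipes.count y := fun y => hperm.count_eq y
    have hmemr : ∀ y : Int, y ∈ x :: xs ↔ y ∈ recipes := fun y => hperm.mem_iff
    -- names for the two sides
    set S : List Int := pvSeenF [] recipes with hS
    set ys : List (List (String × Int)) := pvRuns x 1 xs with hys
    -- S is a nodup enumeration of the values of recipes
    have hSnd : S.Nodup := pvSeenF_nodup recipes [] List.nodup_nil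
    have hSmem : ∀ y : Int, y ∈ S ↔ y ∈ recipes := by
      intro y
      rw [hS, pvSeenF_mem recipes [] y]
      simp
    -- A's loop builds (S.map (fC recipes), S)
    have hA : count_per_recipe recipes = PySem.List.sorted (S.map (fC recipes)) realsort false := by
      unfold count_per_recipe
      rw [show (([], []) : List (List (String × Int)) × List Int)
            = ((([] : List Int)).map (fC recipes), ([] : List Int)) from rfl,
          foldA_eq recipes recipes []]
    -- B's loop builds ys
    have hB : count_per_recipe_alt recipes = ys := by
      unfold count_per_recipe_alt
      rw [hs]
      have h1 : pvStepB [] x = [] ++ [fD x 1] := rfl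
      rw [List.foldl_cons, h1, foldl_stepB_runs xs [] x 1, List.nil_append]
    -- keys of ys are strictly increasing
    have hkeys : ((ys).map realsort).Pairwise (· < ·) := (pvRuns_keys xs x 1 hxlb hxs).1
    have hysnd : ys.Nodup :=
      List.Nodup.of_map realsort (hkeys.imp (fun h => ne_of_lt h))
    have hmapS : (S.map (fC recipes)).map realsort = S := by
      rw [List.map_map]
      have : realsort ∘ fC recipes = id := funext fun y => realsort_fD y _
      rw [this, List.map_id]
    have hcprnd : (S.map (fC recipes)).Nodup :=
      List.Nodup.of_map realsort (by rw [hmapS]; exact hSnd)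
    -- same members
    have hmem : ∀ d, d ∈ ys ↔ d ∈ S.map (fC recipes) := by
      intro d
      rw [hys, pvRuns_mem xs x 1 hxlb hxs d, List.mem_map]
      constructor
      · rintro (hd | ⟨y, hy, hyx, hd⟩)
        · refine ⟨x, (hSmem x).2 ((hmemr x).1 List.mem_cons_self), ?_⟩
          rw [hd, fC]
          congr 1
          rw [← hcount x, List.count_cons_self]
          push_cast; ring
        · refine ⟨y, (hSmem y).2 ((hmemr y).1 (List.mem_cons_of_mem _ hy)), ?_⟩
          rw [hd, fC]
          congr 1
          rw [← hcount y, List.count_cons_of_ne (Ne.symm hyx)]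
      · rintro ⟨y, hyS, rfl⟩
        have hyr : y ∈ x :: xs := (hmemr y).2 ((hSmem y).1 hyS)
        rcases List.mem_cons.1 hyr with rfl | hy
        · left
          rw [fC]
          congr 1
          rw [← hcount y, List.count_cons_self]
          push_cast; ring
        · by_cases hyx : y = x
          · subst hyx
            left
            rw [fC]
            congr 1
            rw [← hcount y, List.count_cons_self]
            push_cast; ring
          · right
            refine ⟨y, hy, hyx, ?_⟩
            rw [fC]
            congr 1
            rw [← hcount y, List.count_cons_of_ne (Ne.symm hyx)]
    have hperm2 : ys.Perm (S.map (fC recipes)) :=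
      (List.perm_ext_iff_of_nodup hysnd hcprnd).2 hmem
    have hpwkey : ys.Pairwise (fun a b => realsort a < realsort b) := List.pairwise_map.1 hkeys
    rw [hA, hB, PySem.List.sorted_eq_of_perm_of_pairwise_lt (S.map (fC recipes)) ys realsort hperm2 hpwkey]
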